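-- pv_equiv track=rewrite | github.com/GrinRus/ai_driven_dev | skills/aidd-observability/runtime/artifact_audit.py | determine_artifact_quality_gate
-- ===== SOURCE A (Python) =====
-- from typing import Any, Iterable
--
-- _SERIOUS_CODES = {
--     "missing_expected_report",
--     "tasklist_ready_without_actual_downstream_reports",
--     "stale_reference",
--     "template_leakage",
--     "context_template_leakage",
--     "status_drift",
--     "expected_report_drift",
-- }
--
-- def determine_artifact_quality_gate(truth_checks: list[dict[str, Any]]) -> str:
--     if any(str(item.get("severity") or "").strip().lower() == "error" for item in truth_checks):
--         return "FAIL"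
--     if any(str(item.get("code") or "").strip() in _SERIOUS_CODES for item in truth_checks):
--         return "WARN"
--     if truth_checks:
--         return "WARN"
--     return "PASS"
-- ===== SOURCE B (Python) =====
-- _VERDICTS = ("PASS", "WARN", "FAIL")
--
-- def determine_artifact_quality_gate(truth_checks):
--     rank = 0
--     for item in truth_checks:
--         sev = str(item.get("severity") or "").strip().lower()
--         rank = max(rank, 2 if sev == "error" else 1)
--     return _VERDICTS[rank]
-- ===== Notes on version B (the rewrite author's own statement) =====
-- stated objective: alternative
-- what changed: B folds the list into a numeric severity rank (max of 2 for error-severity items, 1 otherwise, 0 for the empty list) and indexes a verdict table, instead of A's three staged any()/emptiness branches; the dead _SERIOUS_CODES membership scan disappears since any serious code already implies rank >= 1 (WARN).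
import Mathlib
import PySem

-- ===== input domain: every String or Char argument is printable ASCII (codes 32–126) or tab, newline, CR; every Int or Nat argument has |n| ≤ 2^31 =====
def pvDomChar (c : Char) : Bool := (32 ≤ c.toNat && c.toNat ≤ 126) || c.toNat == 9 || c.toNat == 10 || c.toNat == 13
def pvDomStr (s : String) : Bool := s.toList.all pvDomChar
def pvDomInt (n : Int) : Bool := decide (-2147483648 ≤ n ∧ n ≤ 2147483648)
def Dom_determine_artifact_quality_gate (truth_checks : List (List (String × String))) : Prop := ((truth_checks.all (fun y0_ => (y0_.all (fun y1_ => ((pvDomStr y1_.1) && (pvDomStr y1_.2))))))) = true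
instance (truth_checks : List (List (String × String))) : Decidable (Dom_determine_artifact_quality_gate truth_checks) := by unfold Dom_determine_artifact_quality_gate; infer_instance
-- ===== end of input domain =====

-- B folds the list into a numeric severity rank (max of 2 for error items, 1 otherwise,
-- 0 for the empty list) and indexes a verdict table, replacing A's three staged any()/
-- emptiness branches and its dead _SERIOUS_CODES scan; objective: alternative.

-- str(item.get("severity") or "").strip().lower() == "error"
-- (get returns the first value for the key, or none -> ""; `v or ""` is the identity
-- on strings except "" -> "", which getD "" already produces)
def pvSevError (item : List (String × String)) : Bool :=
  PySem.Str.lower (PySem.Str.strip ((PySem.Dict.mk item).getD "severity" "")) == "error"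

-- ===== PORT A =====
def pvSeriousCodes : List String :=
  ["missing_expected_report", "tasklist_ready_without_actual_downstream_reports",
   "stale_reference", "template_leakage", "context_template_leakage",
   "status_drift", "expected_report_drift"]

def determine_artifact_quality_gate (truth_checks : List (List (String × String))) : String :=
  if truth_checks.any (fun item => pvSevError item) then "FAIL"
  else if truth_checks.any (fun item =>
      pvSeriousCodes.contains (PySem.Str.strip ((PySem.Dict.mk item).getD "code" ""))) then "WARN"
  else if !truth_checks.isEmpty then "WARN"
  else "PASS"

-- ===== PORT B =====
def pvVerdicts : List String := ["PASS", "WARN", "FAIL"]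

def determine_artifact_quality_gate_alt (truth_checks : List (List (String × String))) : String :=
  let rank : Int := truth_checks.foldl
    (fun acc item => max acc (if pvSevError item then 2 else 1)) 0
  -- _VERDICTS[rank]: rank is always 0, 1 or 2, so the tuple index never raises
  (PySem.List.pyGet? pvVerdicts rank).getD ""

-- ===== PRECONDITION & SPEC =====
def Spec_determine_artifact_quality_gate (truth_checks : List (List (String × String))) (out : String) : Prop := out = determine_artifact_quality_gate_alt truth_checks
instance (truth_checks : List (List (String × String))) (out : String) : Decidable (Spec_determine_artifact_quality_gate truth_checks out) := by unfold Spec_determine_artifact_quality_gate; infer_instance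

-- ===== CLAIM (what is proved, stated in full; the proofs are below) =====
def Claim_equal_determine_artifact_quality_gate : Prop := ∀ (truth_checks : List (List (String × String))), Dom_determine_artifact_quality_gate truth_checks → Spec_determine_artifact_quality_gate truth_checks (determine_artifact_quality_gate truth_checks)

-- ===== LEMMAS AND PROOFS =====
-- the fold computes: 0 on [], else 2 iff some item has error severity, else 1
theorem pvRank_eq (tc : List (List (String × String))) : ∀ a : Int, 0 ≤ a →
    tc.foldl (fun acc item => max acc (if pvSevError item then 2 else 1)) a
      = max a (if tc.any (fun item => pvSevError item) then 2
               else if tc.isEmpty then 0 else 1) := by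
  induction tc with
  | nil => intro a ha; simp; omega
  | cons item rest ih =>
    intro a ha
    have hnn : (0:Int) ≤ max a (if pvSevError item then 2 else 1) := by
      split_ifs <;> omega
    simp only [List.foldl_cons, List.any_cons, ih _ hnn]
    by_cases h : pvSevError item = true <;>
      by_cases h2 : rest.any (fun item => pvSevError item) = true <;>
      cases rest <;> simp_all <;> omega

theorem any_ne_nil {α : Type} {p : α → Bool} {l : List α} (h : l.any p = true) : l ≠ [] := by
  intro hnil; subst hnil; simp at h

-- ===== VERDICT (by name: the statement is the Claim_ definition above) =====
theorem determine_artifact_quality_gate_spec : Claim_equal_determine_artifact_quality_gate := by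
  intro tc _
  unfold Spec_determine_artifact_quality_gate determine_artifact_quality_gate
    determine_artifact_quality_gate_alt
  simp only [pvRank_eq _ _ le_rfl]
  by_cases h1 : tc.any (fun item => pvSevError item) = true
  · simp [h1]; decide
  · simp only [h1, if_false, Bool.not_eq_true] at *
    by_cases h2 : tc.any (fun item =>
        pvSeriousCodes.contains (PySem.Str.strip ((PySem.Dict.mk item).getD "code" ""))) = true
    · have := any_ne_nil h2
      simp only [h1, if_false, h2, if_true]
      simp [List.isEmpty_iff, this]; decide
    · simp only [Bool.not_eq_true] at h2
      simp only [h1, h2, if_false]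
      cases tc <;> simp <;> decide
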